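-- pv_equiv track=rewrite | github.com/dope232/bluesky-sentiement-analysis | streamoutput.py | get_sentiment
-- ===== SOURCE A (Python) =====
-- def get_sentiment(data):
--     positive = 0
--     negative = 0
--     for sentence, sentiment in data:
--         if sentiment == "positive":
--             positive += 1
--         else:
--             negative += 1
--     return positive, negative
-- ===== SOURCE B (Python) =====
-- def get_sentiment(data):
--     items = list(data)
--
--     def go(seg):
--         if not seg:
--             return (0, 0)
--         if len(seg) == 1:
--             return (1, 0) if seg[0][1] == "positive" else (0, 1)
--         mid = len(seg) // 2
--         p1, n1 = go(seg[:mid])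
--         p2, n2 = go(seg[mid:])
--         return (p1 + p2, n1 + n2)
--
--     return go(items)
-- ===== Notes on version B (the rewrite author's own statement) =====
-- stated objective: alternative
-- what changed: B replaces A's single linear loop with two accumulators by a divide-and-conquer recursion that splits the list in half, counts each half recursively, and combines the (positive, negative) pairs by componentwise addition.
import Mathlib
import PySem

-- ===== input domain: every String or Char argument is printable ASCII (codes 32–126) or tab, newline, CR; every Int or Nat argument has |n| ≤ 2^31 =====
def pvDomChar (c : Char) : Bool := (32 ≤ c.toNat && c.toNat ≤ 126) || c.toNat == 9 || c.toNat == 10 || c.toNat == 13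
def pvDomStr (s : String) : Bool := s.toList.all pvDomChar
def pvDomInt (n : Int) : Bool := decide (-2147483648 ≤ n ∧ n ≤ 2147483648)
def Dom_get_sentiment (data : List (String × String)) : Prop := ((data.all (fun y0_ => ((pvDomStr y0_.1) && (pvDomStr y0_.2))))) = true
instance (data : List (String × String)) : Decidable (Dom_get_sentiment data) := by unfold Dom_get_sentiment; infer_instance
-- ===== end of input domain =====

-- B replaces A's linear two-counter loop with a divide-and-conquer recursion (halve, recurse, add pairs); alternative decomposition, no speed claim.
-- ===== PORT A =====
def get_sentiment (data : List (String × String)) : Int × Int :=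
  let st := data.foldl (fun (acc : Int × Int) pr =>
    if pr.2 == "positive" then (acc.1 + 1, acc.2) else (acc.1, acc.2 + 1)) (0, 0)
  (st.1, st.2)

-- ===== PORT B =====
-- divide and conquer: empty → (0,0); singleton → classify; else split at len//2 and add the halves' pairs
def pvGo (seg : List (String × String)) : Int × Int :=
  if seg = [] then (0, 0)
  else if seg.length = 1 then
    if (seg.headI).2 == "positive" then (1, 0) else (0, 1)
  else
    let mid := seg.length / 2
    let l := pvGo (seg.take mid)
    let r := pvGo (seg.drop mid)
    (l.1 + r.1, l.2 + r.2)
termination_by seg.length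
decreasing_by
  all_goals {
    have h0 : seg ≠ [] := by assumption
    have h1 : seg.length ≠ 1 := by assumption
    have h2 : seg.length ≠ 0 := by simpa [List.length_eq_zero_iff] using h0
    simp only [List.length_take, List.length_drop]
    omega
  }

def get_sentiment_alt (data : List (String × String)) : Int × Int :=
  pvGo data

-- ===== PRECONDITION & SPEC =====
def Spec_get_sentiment (data : List (String × String)) (out : Int × Int) : Prop := out = get_sentiment_alt data
instance (data : List (String × String)) (out : Int × Int) : Decidable (Spec_get_sentiment data out) := by unfold Spec_get_sentiment; infer_instance

-- ===== CLAIM (what is proved, stated in full; the proofs are below) =====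
def Claim_equal_get_sentiment : Prop := ∀ (data : List (String × String)), Dom_get_sentiment data → Spec_get_sentiment data (get_sentiment data)

-- ===== LEMMAS AND PROOFS =====
def pvCnt (seg : List (String × String)) : Int :=
  ((seg.map Prod.snd).count "positive" : Int)

lemma pvGo_eq (seg : List (String × String)) :
    pvGo seg = (pvCnt seg, (seg.length : Int) - pvCnt seg) := by
  induction seg using pvGo.induct with
  | case1 => simp [pvGo, pvCnt]
  | case2 seg hne h1 hp =>
    rw [pvGo, if_neg hne, if_pos h1, if_pos hp]
    cases seg with
    | nil => simp at hne
    | cons a t =>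
      have ht : t = [] := by simpa using h1
      subst ht
      have hp' : a.2 = "positive" := by simpa using hp
      simp [pvCnt, hp']
  | case3 seg hne h1 hp =>
    rw [pvGo, if_neg hne, if_pos h1, if_neg hp]
    cases seg with
    | nil => simp at hne
    | cons a t =>
      have ht : t = [] := by simpa using h1
      subst ht
      have hp' : ¬ a.2 = "positive" := by simpa using hp
      simp [pvCnt, hp', List.count_cons]
  | case4 seg hne h1 mid ihT ihD =>
    rw [pvGo, if_neg hne, if_neg h1]
    have ihT' : pvGo (seg.take (seg.length / 2))
        = (pvCnt (seg.take (seg.length / 2)),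
           ((seg.take (seg.length / 2)).length : Int) - pvCnt (seg.take (seg.length / 2))) := ihT
    have ihD' : pvGo (seg.drop (seg.length / 2))
        = (pvCnt (seg.drop (seg.length / 2)),
           ((seg.drop (seg.length / 2)).length : Int) - pvCnt (seg.drop (seg.length / 2))) := ihD
    simp only [ihT', ihD']
    have hsplit : seg.take (seg.length / 2) ++ seg.drop (seg.length / 2) = seg :=
      List.take_append_drop _ _
    have hc : pvCnt (seg.take (seg.length / 2)) + pvCnt (seg.drop (seg.length / 2)) = pvCnt seg := by
      unfold pvCnt
      rw [List.map_take, List.map_drop, ← Nat.cast_add, ← List.count_append, List.take_append_drop]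
    have hl : (seg.take (seg.length / 2)).length + (seg.drop (seg.length / 2)).length = seg.length := by
      simp; omega
    have hlI : ((seg.take (seg.length / 2)).length : Int) + ((seg.drop (seg.length / 2)).length : Int) = (seg.length : Int) := by
      exact_mod_cast hl
    refine Prod.ext ?_ ?_
    · simpa using hc
    · simp only
      linarith [hc, hlI]

lemma fold_char (data : List (String × String)) (p n : Int) :
    data.foldl (fun (acc : Int × Int) pr =>
      if pr.2 == "positive" then (acc.1 + 1, acc.2) else (acc.1, acc.2 + 1)) (p, n)
    = (p + pvCnt data, n + (data.length : Int) - pvCnt data) := by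
  induction data generalizing p n with
  | nil => simp [pvCnt]
  | cons h t ih =>
    rw [List.foldl_cons]
    by_cases hp : h.2 = "positive"
    · rw [if_pos (by simpa using hp), ih]
      simp only [pvCnt, List.map_cons, List.count_cons, hp, List.length_cons, Prod.mk.injEq]
      constructor <;> (simp; push_cast; ring)
    · rw [if_neg (by simpa using hp), ih]
      simp only [pvCnt, List.map_cons, List.count_cons, List.length_cons, Prod.mk.injEq]
      simp only [hp, beq_iff_eq, if_false]
      push_cast
      omega

-- ===== VERDICT (by name: the statement is the Claim_ definition above) =====
theorem get_sentiment_spec : Claim_equal_get_sentiment := by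
  intro data _
  unfold Spec_get_sentiment get_sentiment get_sentiment_alt
  rw [fold_char, pvGo_eq]
  simp
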